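-- pv_equiv track=rewrite | github.com/bioinformatics-company/gl1-seq | seqnft_pipeline.py | _mask_intervals_from_raw
-- ===== SOURCE A (Python) =====
-- from typing import Any, Dict, Iterable, Iterator, List, Optional, Sequence, Tuple, Union
--
-- def _mask_intervals_from_raw(raw_no_ws: str) -> List[Tuple[int, int]]:
--     """
--     Compute lowercase intervals from a sequence that has no whitespace and keeps original case.
--     """
--     out: List[Tuple[int, int]] = []
--     run: Optional[int] = None
--     for i, ch in enumerate(raw_no_ws):
--         is_low = "a" <= ch <= "z"
--         if is_low and run is None:
--             run = i
--         if (not is_low) and run is not None: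
--             out.append((run, i - run))
--             run = None
--     if run is not None:
--         out.append((run, len(raw_no_ws) - run))
--     return out
-- ===== SOURCE B (Python) =====
-- def _mask_intervals_from_raw(raw_no_ws):
--     """Skip/take scan: jump over each maximal lowercase run in an inner loop."""
--     out = []
--     n = len(raw_no_ws)
--     i = 0
--     while i < n:
--         if 'a' <= raw_no_ws[i] <= 'z':
--             j = i
--             while j < n and 'a' <= raw_no_ws[j] <= 'z':
--                 j += 1
--             out.append((i, j - i))
--             i = j
--         else:
--             i += 1
--     return out
-- ===== Notes on version B (the rewrite author's own statement) =====
-- stated objective: alternative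
-- what changed: Replaces the single-pass state machine (Optional run sentinel + end-of-string flush) with a skip/take two-level scan that finds each run's start and consumes the whole run in an inner loop, emitting the interval immediately.
import Mathlib
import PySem

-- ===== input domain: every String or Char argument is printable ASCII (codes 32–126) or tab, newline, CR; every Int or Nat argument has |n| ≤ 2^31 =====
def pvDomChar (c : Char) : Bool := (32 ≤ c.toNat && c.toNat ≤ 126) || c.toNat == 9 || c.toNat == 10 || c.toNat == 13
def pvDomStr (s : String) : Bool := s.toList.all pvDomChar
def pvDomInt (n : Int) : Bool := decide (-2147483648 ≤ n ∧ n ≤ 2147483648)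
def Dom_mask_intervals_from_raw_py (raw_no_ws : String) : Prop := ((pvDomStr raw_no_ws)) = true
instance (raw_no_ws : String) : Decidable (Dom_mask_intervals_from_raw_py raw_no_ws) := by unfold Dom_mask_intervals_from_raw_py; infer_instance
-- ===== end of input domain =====

-- B replaces A's one-pass state machine (Optional run sentinel + final flush) with a
-- skip/take scan that consumes each maximal lowercase run in an inner loop; same O(n) cost.

-- 'a' <= ch <= 'z' (shared character test, identical in both Pythons)
def pvLow (c : Char) : Bool := decide ('a' ≤ c ∧ c ≤ 'z')

-- ===== PORT A =====
-- the 'for i, ch in enumerate(raw_no_ws)' loop, carrying (out, run); branches in source order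
def loopA : List Char → Nat → List (Int × Int) → Option Int → List (Int × Int) × Option Int
  | [], _, out, run => (out, run)
  | ch :: rest, i, out, run =>
    let is_low := pvLow ch
    let run1 : Option Int := if is_low && run.isNone then some (i : Int) else run
    match run1 with
    | some r =>
      if is_low then loopA rest (i + 1) out (some r)
      else loopA rest (i + 1) (out ++ [(r, (i : Int) - r)]) none
    | none => loopA rest (i + 1) out none

def mask_intervals_from_raw_py (raw_no_ws : String) : List (Int × Int) :=
  match loopA raw_no_ws.toList 0 [] none with
  | (out, some r) => out ++ [(r, (raw_no_ws.toList.length : Int) - r)]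
  | (out, none) => out

-- ===== PORT B =====
-- inner while 'j < n and lowercase': how far j advances from the current position
def runLenB : List Char → Nat
  | [] => 0
  | c :: rest => if pvLow c then runLenB rest + 1 else 0

theorem runLenB_le (l : List Char) : runLenB l ≤ l.length := by
  induction l with
  | nil => simp [runLenB]
  | cons c rest ih => simp only [runLenB, List.length_cons]; split <;> omega

-- outer while over the remaining characters (position i carried alongside)
def goB : List Char → Nat → List (Int × Int)
  | [], _ => []
  | c :: rest, i =>
    if pvLow c then
      let k := runLenB (c :: rest)
      ((i : Int), (k : Int)) :: goB (List.drop k (c :: rest)) (i + k)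
    else
      goB rest (i + 1)
termination_by l _ => l.length
decreasing_by
  · have h := runLenB_le rest
    simp only [runLenB, *, if_pos]
    simp only [List.length_drop, List.length_cons]
    omega
  · simp

def mask_intervals_from_raw_py_alt (raw_no_ws : String) : List (Int × Int) :=
  goB raw_no_ws.toList 0

-- ===== PRECONDITION & SPEC =====
def Spec_mask_intervals_from_raw_py (raw_no_ws : String) (out : List (Int × Int)) : Prop := out = mask_intervals_from_raw_py_alt raw_no_ws
instance (raw_no_ws : String) (out : List (Int × Int)) : Decidable (Spec_mask_intervals_from_raw_py raw_no_ws out) := by unfold Spec_mask_intervals_from_raw_py; infer_instance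

-- ===== CLAIM (what is proved, stated in full; the proofs are below) =====
def Claim_equal_mask_intervals_from_raw_py : Prop := ∀ (raw_no_ws : String), Dom_mask_intervals_from_raw_py raw_no_ws → Spec_mask_intervals_from_raw_py raw_no_ws (mask_intervals_from_raw_py raw_no_ws)

-- ===== LEMMAS AND PROOFS =====

-- flush of A's loop state against the end index n
def flushA (n : Nat) : List (Int × Int) × Option Int → List (Int × Int)
  | (out, some r) => out ++ [(r, (n : Int) - r)]
  | (out, none) => out

-- joint loop invariant: A's loop from state `none` produces goB; from state `some r`
-- it first closes the pending run (which B opened at r) and then continues as goB.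
theorem loopA_inv (l : List Char) :
    (∀ (i : Nat) (out : List (Int × Int)),
      flushA (i + l.length) (loopA l i out none) = out ++ goB l i) ∧
    (∀ (i : Nat) (r : Int) (out : List (Int × Int)),
      flushA (i + l.length) (loopA l i out (some r)) =
        out ++ ((r, ((i + runLenB l : Nat) : Int) - r) :: goB (List.drop (runLenB l) l) (i + runLenB l))) := by
  induction l with
  | nil =>
    constructor
    · intro i out; simp [loopA, flushA, goB]
    · intro i r out; simp [loopA, flushA, goB, runLenB]
  | cons c rest ih =>
    obtain ⟨ihn, ihs⟩ := ih
    have hlen : ∀ i : Nat, i + (c :: rest).length = (i + 1) + rest.length := by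
      intro i; simp [List.length_cons]; omega
    constructor
    · intro i out
      by_cases hc : pvLow c = true
      · have e : loopA (c :: rest) i out none = loopA rest (i + 1) out (some (i : Int)) := by
          simp [loopA, hc]
        rw [e, hlen, ihs (i + 1) (i : Int) out, goB, if_pos hc]
        simp only [runLenB, hc, if_pos, List.drop_succ_cons]
        have h1 : ((i + 1 + runLenB rest : Nat) : Int) - (i : Int) = ((runLenB rest + 1 : Nat) : Int) := by
          push_cast; ring
        have h2 : i + 1 + runLenB rest = i + (runLenB rest + 1) := by omega
        rw [h1, h2]
      · have e : loopA (c :: rest) i out none = loopA rest (i + 1) out none := by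
          simp [loopA, hc]
        rw [e, hlen, ihn (i + 1) out, goB, if_neg hc]
    · intro i r out
      by_cases hc : pvLow c = true
      · have e : loopA (c :: rest) i out (some r) = loopA rest (i + 1) out (some r) := by
          simp [loopA, hc]
        rw [e, hlen, ihs (i + 1) r out]
        simp only [runLenB, hc, if_pos, List.drop_succ_cons]
        have h2 : i + 1 + runLenB rest = i + (runLenB rest + 1) := by omega
        rw [h2]
      · have e : loopA (c :: rest) i out (some r) =
            loopA rest (i + 1) (out ++ [(r, (i : Int) - r)]) none := by
          simp [loopA, hc]
        rw [e, hlen, ihn (i + 1) (out ++ [(r, (i : Int) - r)])]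
        have eg : goB (c :: rest) i = goB rest (i + 1) := by
          rw [goB.eq_def]; simp [hc]
        simp only [runLenB, hc]
        simp [eg]

-- ===== VERDICT (by name: the statement is the Claim_ definition above) =====
theorem mask_intervals_from_raw_py_spec : Claim_equal_mask_intervals_from_raw_py := by
  intro s _
  show mask_intervals_from_raw_py s = mask_intervals_from_raw_py_alt s
  have h := (loopA_inv s.toList).1 0 []
  simpa [mask_intervals_from_raw_py, mask_intervals_from_raw_py_alt, flushA, Nat.zero_add] using h
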